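-- pv_equiv track=rewrite | github.com/nord2sudjp/atcoder | library/文字列分割.py | divstr
-- ===== SOURCE A (Python) =====
-- def divstr(S):
--     S=''.join([S,'$'])
--
--     ans=[]
--     L=len(S)
--
--     lake=S[0]
--     i=1
--     while i<L:
--         if S[i]=='$':
--          ans.append(lake)
--         elif lake[0] != S[i]:
--          ans.append(lake)
--          lake=S[i]
--         else:
--          lake+=S[i]
--         i+=1
--     return ans
-- ===== SOURCE B (Python) =====
-- def divstr(S):
--     n = len(S)
--     cuts = [i for i in range(n + 1) if i == 0 or i == n or S[i] != S[i - 1]]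
--     return [S[a:b] for a, b in zip(cuts, cuts[1:])]
-- ===== Notes on version B (the rewrite author's own statement) =====
-- stated objective: alternative
-- what changed: B replaces A's single accumulator scan with a '$' sentinel by a two-pass scheme: first collect the list of run-boundary indices (0, every i with S[i] != S[i-1], and len(S)), then emit the result by slicing S between consecutive cut points. Pre_ excludes strings containing '$', the character A reserves as its end-of-string sentinel: there the sentinel collides with the data and A merges or duplicates runs across the '$', while B simply splits maximal runs.
-- outside the precondition, e.g. on divstr('a$'): A returns ['a', 'a'], B returns ['a', '$']; on divstr('$$'): A returns ['$', '$'], B returns ['$$']; on divstr('a$a'): A returns ['a', 'aa'], B returns ['a', '$', 'a']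
import Mathlib
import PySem

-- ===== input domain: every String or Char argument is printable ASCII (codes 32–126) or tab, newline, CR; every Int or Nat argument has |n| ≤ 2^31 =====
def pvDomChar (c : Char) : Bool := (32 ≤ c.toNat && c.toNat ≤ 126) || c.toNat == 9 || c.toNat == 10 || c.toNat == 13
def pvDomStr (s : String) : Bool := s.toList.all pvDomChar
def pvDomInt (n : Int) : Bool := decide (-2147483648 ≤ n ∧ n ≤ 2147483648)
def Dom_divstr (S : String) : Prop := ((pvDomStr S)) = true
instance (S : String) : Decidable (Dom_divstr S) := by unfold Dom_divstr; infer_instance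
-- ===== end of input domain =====

-- B replaces A's sentinel-scan with a two-pass scheme: collect run-boundary indices, then
-- slice between consecutive cuts (objective: alternative decomposition; not measurably faster).


-- ===== PORT A =====
-- A's while loop: state lake (current accumulated run string) and ans; the input list
-- is the remainder S[i:] of the sentinel-extended string
def divstrLoopA (lake : List Char) (ans : List String) : List Char → List String
  | [] => ans
  | c :: cs =>
    if c = '$' then divstrLoopA lake (ans ++ [String.ofList lake]) cs
    else if PySem.List.pyGet? lake 0 ≠ some c then divstrLoopA [c] (ans ++ [String.ofList lake]) cs
    else divstrLoopA (lake ++ [c]) ans cs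

def divstr (S : String) : List String :=
  match (S ++ "$").toList with
  | [] => []              -- unreachable: the appended sentinel makes the string nonempty
  | c0 :: rest => divstrLoopA [c0] [] rest   -- lake = S[0], loop from i = 1

-- ===== PORT B =====
-- Source B's boundary predicate: i == 0 or i == n or S[i] != S[i-1]
def cutPred (cs : List Char) (i : Int) : Bool :=
  i == 0 || i == (cs.length : Int) || !(PySem.List.pyGet? cs i == PySem.List.pyGet? cs (i - 1))

-- Source B's first pass: cuts = [i for i in range(n + 1) if i == 0 or i == n or S[i] != S[i-1]]
def cutsOf (cs : List Char) : List Int :=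
  (PySem.List.pyRange 0 ((cs.length : Int) + 1) 1).filter (cutPred cs)

-- Source B's second pass: [S[a:b] for a, b in zip(cuts, cuts[1:])]  (cuts[1:] = drop 1;
-- string slicing ported on the list side, exact)
def divstr_alt (S : String) : List String :=
  let cs := S.toList
  let cuts := cutsOf cs
  (cuts.zip (cuts.drop 1)).map (fun ab => String.ofList (PySem.List.slice cs (some ab.1) (some ab.2)))

-- ===== PRECONDITION & SPEC =====
-- Pre_ excludes strings containing '$', the character A reserves as its end-of-string
-- sentinel: on them the sentinel collides with the data and A's output merges or
-- duplicates runs across the '$'; B simply splits maximal runs there.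
def Pre_divstr (S : String) : Prop := '$' ∉ S.toList
instance (S : String) : Decidable (Pre_divstr S) := by unfold Pre_divstr; infer_instance

def pvWitness_divstr : String := "aabba"

def Spec_divstr (S : String) (out : List String) : Prop := out = divstr_alt S
instance (S : String) (out : List String) : Decidable (Spec_divstr S out) := by unfold Spec_divstr; infer_instance

-- ===== CLAIM (what is proved, stated in full; the proofs are below) =====
def Claim_equal_divstr : Prop := ∀ (S : String), Dom_divstr S → Pre_divstr S → Spec_divstr S (divstr S)

-- ===== LEMMAS AND PROOFS =====

-- Nat-indexed mirror of B's boundary predicate and cut list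
def natCutPred (cs : List Char) (i : Nat) : Bool :=
  i == 0 || i == cs.length || !(cs[i]? == cs[i - 1]?)

def natCuts (cs : List Char) : List Nat :=
  (List.range (cs.length + 1)).filter (natCutPred cs)

-- Nat-indexed mirror of B's second pass
def altN (cs : List Char) : List String :=
  ((natCuts cs).zip ((natCuts cs).drop 1)).map
    (fun ab => String.ofList ((cs.drop ab.1).take (ab.2 - ab.1)))

-- the common run loop both sides are reduced to
def runLoop (c : Char) (k : Nat) (res : List String) : List Char → List String
  | [] => res ++ [String.ofList (List.replicate k c)]
  | d :: ds =>
    if d = c then runLoop c (k + 1) res ds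
    else runLoop d 1 (res ++ [String.ofList (List.replicate k c)]) ds

theorem altN_nil : altN [] = [] := rfl

theorem cutPred_natCast (cs : List Char) (i : Nat) :
    cutPred cs (i : Int) = natCutPred cs i := by
  cases i with
  | zero => simp [cutPred, natCutPred]
  | succ j =>
    have hb : ∀ m n : Nat, (((m : Nat) : Int) == ((n : Nat) : Int)) = (m == n) := by
      intro m n
      by_cases h : m = n
      · simp [h]
      · have h' : (m : Int) ≠ (n : Int) := by exact_mod_cast h
        simp [h, h']
    unfold cutPred natCutPred
    rw [show ((j + 1 : Nat) : Int) - 1 = ((j : Nat) : Int) by push_cast; ring]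
    rw [PySem.List.pyGet?_natCast, PySem.List.pyGet?_natCast]
    rw [show (0 : Int) = ((0 : Nat) : Int) from rfl, hb, hb]
    simp

theorem cutsOf_eq_natCuts (cs : List Char) :
    cutsOf cs = (natCuts cs).map (Nat.cast : Nat → Int) := by
  unfold cutsOf natCuts
  rw [PySem.List.pyRange_one]
  rw [show ((cs.length : Int) + 1 - 0).toNat = cs.length + 1 by omega]
  rw [List.filter_map]
  have hf : List.filter (cutPred cs ∘ fun k : Nat => (0 : Int) + ↑k) (List.range (cs.length + 1))
      = List.filter (natCutPred cs) (List.range (cs.length + 1)) := by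
    refine List.filter_congr (fun x _ => ?_)
    simp only [Function.comp_apply, zero_add]
    exact cutPred_natCast cs x
  rw [hf]
  exact List.map_congr_left (fun x _ => by simp)

theorem alt_eq_altN (S : String) : divstr_alt S = altN S.toList := by
  have hA : divstr_alt S = ((cutsOf S.toList).zip ((cutsOf S.toList).drop 1)).map
      (fun ab => String.ofList (PySem.List.slice S.toList (some ab.1) (some ab.2))) := rfl
  rw [hA]
  unfold altN
  rw [cutsOf_eq_natCuts]
  rw [← List.map_drop]
  rw [List.zip_map]
  rw [List.map_map]
  refine List.map_congr_left (fun ab _ => ?_)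
  obtain ⟨a, b⟩ := ab
  simp [PySem.List.slice_natCast]

theorem natCuts_head (cs : List Char) : ∃ t, natCuts cs = 0 :: t := by
  refine ⟨((List.range cs.length).map Nat.succ).filter (natCutPred cs), ?_⟩
  unfold natCuts
  rw [List.range_succ_eq_map]
  rw [List.filter_cons_of_pos (by simp [natCutPred])]

theorem natCuts_run (k : Nat) (c : Char) (rest : List Char) (hk : 1 ≤ k)
    (hh : rest.head? ≠ some c) :
    natCuts (List.replicate k c ++ rest) = 0 :: (natCuts rest).map (k + ·) := by
  obtain ⟨j, rfl⟩ : ∃ j, k = j + 1 := ⟨k - 1, by omega⟩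
  have hlen : (List.replicate (j + 1) c ++ rest).length = (j + 1) + rest.length := by simp
  unfold natCuts
  rw [hlen, show (j + 1) + rest.length + 1 = (j + 1) + (rest.length + 1) by omega,
      List.range_add, List.filter_append]
  have hleft : (List.range (j + 1)).filter (natCutPred (List.replicate (j + 1) c ++ rest)) = [0] := by
    rw [List.range_succ_eq_map, List.filter_cons_of_pos (by simp [natCutPred])]
    have : (List.filter (natCutPred (List.replicate (j + 1) c ++ rest))
        ((List.range j).map Nat.succ)) = [] := by
      rw [List.filter_eq_nil_iff]
      intro a ha
      obtain ⟨i, hi, rfl⟩ := List.mem_map.mp ha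
      have hij : i < j := List.mem_range.mp hi
      have e1 : (List.replicate (j + 1) c ++ rest)[i + 1]? = some c := by
        rw [List.getElem?_append_left (by simp only [List.length_replicate]; omega),
          List.getElem?_replicate, if_pos (by omega)]
      have e2 : (List.replicate (j + 1) c ++ rest)[i]? = some c := by
        rw [List.getElem?_append_left (by simp only [List.length_replicate]; omega),
          List.getElem?_replicate, if_pos (by omega)]
      simp [natCutPred, e1, e2, Nat.succ_eq_add_one]
      omega
    rw [this]
  rw [hleft, List.filter_map]
  have hright : List.filter (natCutPred (List.replicate (j + 1) c ++ rest) ∘ ((j + 1) + ·))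
      (List.range (rest.length + 1)) = List.filter (natCutPred rest) (List.range (rest.length + 1)) := by
    refine List.filter_congr (fun x hx => ?_)
    have hxm : x ≤ rest.length := by have := List.mem_range.mp hx; omega
    simp only [Function.comp_apply]
    rcases Nat.eq_zero_or_pos x with rfl | hpos
    · cases rest with
      | nil => simp [natCutPred]
      | cons d ds =>
        have hdc : d ≠ c := by intro e; exact hh (by simp [e])
        have e1 : (List.replicate (j + 1) c ++ d :: ds)[j + 1 + 0]? = some d := by
          rw [List.getElem?_append_right (by simp only [List.length_replicate]; omega)]
          simp
        have e2 : (List.replicate (j + 1) c ++ d :: ds)[j]? = some c := by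
          rw [List.getElem?_append_left (by simp only [List.length_replicate]; omega),
            List.getElem?_replicate, if_pos (by omega)]
        simp [natCutPred, e2, hdc]
    · have e1 : (List.replicate (j + 1) c ++ rest)[j + 1 + x]? = rest[x]? := by
        rw [List.getElem?_append_right (by simp only [List.length_replicate]; omega)]
        congr 1
        simp only [List.length_replicate]
        omega
      have e2 : (List.replicate (j + 1) c ++ rest)[j + 1 + x - 1]? = rest[x - 1]? := by
        rw [List.getElem?_append_right (by simp only [List.length_replicate]; omega)]
        congr 1
        simp only [List.length_replicate]
        omega
      have e0 : ((j + 1 + x == 0) : Bool) = (x == 0) := by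
        have h2 : x ≠ 0 := by omega
        simp [h2]
      have e3 : ((j + 1 + x == (List.replicate (j + 1) c ++ rest).length) : Bool)
          = (x == rest.length) := by
        simp
      unfold natCutPred
      rw [e0, e1, e2, e3]
  rw [hright]
  rfl

theorem altN_run (k : Nat) (c : Char) (rest : List Char) (hk : 1 ≤ k)
    (hh : rest.head? ≠ some c) :
    altN (List.replicate k c ++ rest) =
      String.ofList (List.replicate k c) :: altN rest := by
  obtain ⟨t, ht⟩ := natCuts_head rest
  have key : ∀ a b : Nat,
      String.ofList (((List.replicate k c ++ rest).drop (k + a)).take ((k + b) - (k + a)))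
        = String.ofList ((rest.drop a).take (b - a)) := by
    intro a b
    have hd : (List.replicate k c ++ rest).drop (k + a) = rest.drop a := by
      rw [← List.drop_drop, List.drop_left' (by simp)]
    rw [hd, Nat.add_sub_add_left]
  unfold altN
  rw [natCuts_run k c rest hk hh, ht]
  simp only [List.map_cons, List.drop_one, List.tail_cons, List.zip_cons_cons]
  rw [show ((k + 0) :: (t.map (k + ·))) = (0 :: t).map (k + ·) by simp]
  rw [List.zip_map]
  congr 1
  · have h2 : (List.replicate k c ++ rest).take k = List.replicate k c :=
      List.take_left' (List.length_replicate ..)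
    simp [h2]
  · rw [List.map_map]
    refine List.map_congr_left (fun ab _ => ?_)
    obtain ⟨a, b⟩ := ab
    simpa using key a b

theorem runLoop_eq_altN (rest : List Char) :
    ∀ (c : Char) (k : Nat) (res : List String), 1 ≤ k →
      runLoop c k res rest = res ++ altN (List.replicate k c ++ rest) := by
  induction rest with
  | nil =>
    intro c k res hk
    rw [List.append_nil, show List.replicate k c = List.replicate k c ++ [] by simp,
      altN_run k c [] hk (by simp), altN_nil]
    simp [runLoop]
  | cons d ds ih =>
    intro c k res hk
    by_cases hdc : d = c
    · subst hdc
      rw [show runLoop d k res (d :: ds) = runLoop d (k + 1) res ds by simp [runLoop]]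
      rw [ih d (k + 1) res (by omega)]
      have : List.replicate k d ++ d :: ds = List.replicate (k + 1) d ++ ds := by
        rw [List.replicate_succ', List.append_assoc]; rfl
      rw [this]
    · rw [show runLoop c k res (d :: ds) =
            runLoop d 1 (res ++ [String.ofList (List.replicate k c)]) ds by simp [runLoop, hdc]]
      rw [ih d 1 _ (by omega)]
      rw [altN_run k c (d :: ds) hk (by simp [hdc])]
      simp

theorem loopA_eq_runLoop (rest : List Char) :
    ∀ (c : Char) (k : Nat) (res : List String), 1 ≤ k → c ≠ '$' → '$' ∉ rest →
      divstrLoopA (List.replicate k c) res (rest ++ ['$']) = runLoop c k res rest := by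
  induction rest with
  | nil =>
    intro c k res hk hc _
    simp [divstrLoopA, runLoop]
  | cons d ds ih =>
    intro c k res hk hc hmem
    have hd : d ≠ '$' := fun e => hmem (by rw [e]; exact List.mem_cons_self ..)
    have hds : '$' ∉ ds := fun e => hmem (List.mem_cons_of_mem _ e)
    obtain ⟨k', rfl⟩ : ∃ k', k = k' + 1 := ⟨k - 1, by omega⟩
    rw [List.cons_append]
    by_cases hdc : d = c
    · subst hdc
      have e1 : divstrLoopA (List.replicate (k' + 1) d) res (d :: (ds ++ ['$'])) =
          divstrLoopA (List.replicate (k' + 1) d ++ [d]) res (ds ++ ['$']) := by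
        simp [divstrLoopA, hd]
      have e2 : runLoop d (k' + 1) res (d :: ds) = runLoop d (k' + 1 + 1) res ds := by
        simp [runLoop]
      rw [e1, e2, show List.replicate (k' + 1) d ++ [d] = List.replicate (k' + 1 + 1) d from
        (List.replicate_succ' ..).symm]
      exact ih d (k' + 1 + 1) res (by omega) hd hds
    · have e1 : divstrLoopA (List.replicate (k' + 1) c) res (d :: (ds ++ ['$'])) =
          divstrLoopA [d] (res ++ [String.ofList (List.replicate (k' + 1) c)]) (ds ++ ['$']) := by
        simp [divstrLoopA, hd, Ne.symm hdc]
      have e2 : runLoop c (k' + 1) res (d :: ds) =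
          runLoop d 1 (res ++ [String.ofList (List.replicate (k' + 1) c)]) ds := by
        simp [runLoop, hdc]
      rw [e1, e2, show ([d] : List Char) = List.replicate 1 d from rfl]
      exact ih d 1 _ (by omega) hd hds

-- ===== VERDICT (by name: the statement is the Claim_ definition above) =====
theorem divstr_spec : Claim_equal_divstr := by
  intro S _ hP
  show divstr S = divstr_alt S
  rw [alt_eq_altN]
  unfold divstr
  rw [show (S ++ "$").toList = S.toList ++ ['$'] by simp]
  cases h : S.toList with
  | nil => simp [divstrLoopA, altN_nil, List.nil_append]
  | cons c rest =>
    have hc : c ≠ '$' := fun e => hP (show '$' ∈ S.toList by rw [h, ← e]; exact List.mem_cons_self ..)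
    have hr : '$' ∉ rest := fun e => hP (show '$' ∈ S.toList by rw [h]; exact List.mem_cons_of_mem _ e)
    show divstrLoopA [c] [] (rest ++ ['$']) = altN (c :: rest)
    rw [show ([c] : List Char) = List.replicate 1 c from rfl,
      loopA_eq_runLoop rest c 1 [] (by omega) hc hr,
      runLoop_eq_altN rest c 1 [] (by omega)]
    simp
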